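-- pv_equiv track=rewrite | github.com/alanrmatthews/AdventOfCode | AoC2015/day25.py | get_linear_index
-- ===== SOURCE A (Python) =====
-- def get_linear_index(row, col):
--     """Get the linear index of the given row and column (1-based)."""
--     #    | 1   2   3   4   5   6
--     # ---+---+---+---+---+---+---+
--     #  1 |  1   3   6  10  15  21
--     #  2 |  2   5   9  14  20
--     #  3 |  4   8  13  19
--     #  4 |  7  12  18
--     #  5 | 11  17
--     #  6 | 16
--
--     row_start = 1
--     counter = 1
--     for _ in range(2, row + 1):
--         row_start += counter
--         counter += 1
--
--     index = row_start
--     counter = row + 1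
--     for _ in range(2, col + 1):
--         index += counter
--         counter += 1
--
--     return index
-- ===== SOURCE B (Python) =====
-- def get_linear_index(row, col):
--     """Get the linear index of the given row and column (1-based)."""
--     # Closed form: walking down row-1 steps costs the triangular number
--     # T(r) = r*(r+1)//2 starting from 1, then walking right col-1 steps
--     # along the diagonal adds (col-1)*(row+1) + T'(col-1) more.
--     r = max(row - 1, 0)
--     c = max(col - 1, 0)
--     return 1 + r * (r + 1) // 2 + c * (row + 1) + c * (c - 1) // 2
-- ===== Notes on version B (the rewrite author's own statement) =====
-- stated objective: faster
-- what changed: Replaced the two accumulation loops by a closed-form triangular-number formula (clamped at 0 so it agrees with A's empty-loop behaviour for rows/cols below 1).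
import Mathlib
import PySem

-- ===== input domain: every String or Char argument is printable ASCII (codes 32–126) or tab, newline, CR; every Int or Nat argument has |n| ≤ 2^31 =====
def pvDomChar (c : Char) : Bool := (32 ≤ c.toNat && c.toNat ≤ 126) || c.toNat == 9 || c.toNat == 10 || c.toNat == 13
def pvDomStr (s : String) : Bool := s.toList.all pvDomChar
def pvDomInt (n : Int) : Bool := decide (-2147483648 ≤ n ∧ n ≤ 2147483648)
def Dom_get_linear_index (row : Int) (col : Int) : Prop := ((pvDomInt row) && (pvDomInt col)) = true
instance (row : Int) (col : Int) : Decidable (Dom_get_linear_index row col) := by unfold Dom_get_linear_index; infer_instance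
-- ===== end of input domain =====

-- B replaces A's two accumulation loops by a closed-form triangular-number formula (O(1) instead of O(row+col)).

-- ===== PORT A =====
-- literal port: two for-loops over range(2, row+1) / range(2, col+1), each carrying (accumulator, counter)
def get_linear_index (row : Int) (col : Int) : Int :=
  let p := (PySem.List.pyRange 2 (row + 1) 1).foldl
    (fun (st : Int × Int) _ => (st.1 + st.2, st.2 + 1)) (1, 1)
  let row_start := p.1
  let q := (PySem.List.pyRange 2 (col + 1) 1).foldl
    (fun (st : Int × Int) _ => (st.1 + st.2, st.2 + 1)) (row_start, row + 1)
  q.1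

-- ===== PORT B =====
def get_linear_index_alt (row : Int) (col : Int) : Int :=
  let r := max (row - 1) 0
  let c := max (col - 1) 0
  1 + PySem.Int.floordiv (r * (r + 1)) 2 + c * (row + 1) + PySem.Int.floordiv (c * (c - 1)) 2

-- ===== PRECONDITION & SPEC =====
def Spec_get_linear_index (row : Int) (col : Int) (out : Int) : Prop := out = get_linear_index_alt row col
instance (row : Int) (col : Int) (out : Int) : Decidable (Spec_get_linear_index row col out) := by unfold Spec_get_linear_index; infer_instance

-- ===== CLAIM (what is proved, stated in full; the proofs are below) =====
def Claim_equal_get_linear_index : Prop := ∀ (row : Int) (col : Int), Dom_get_linear_index row col → Spec_get_linear_index row col (get_linear_index row col)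

-- ===== LEMMAS AND PROOFS =====

-- T n = 0 + 1 + ... + (n-1), the amount the accumulator gains beyond n copies of the counter
def pvTri : ℕ → ℕ
  | 0 => 0
  | n + 1 => pvTri n + n

theorem pv_foldl_incr (l : List Int) (s c : Int) :
    l.foldl (fun (st : Int × Int) _ => (st.1 + st.2, st.2 + 1)) (s, c)
      = (s + l.length * c + (pvTri l.length : Int), c + l.length) := by
  induction l generalizing s c with
  | nil => simp [pvTri]
  | cons a t ih =>
    simp only [List.foldl_cons, List.length_cons, ih, pvTri, Prod.mk.injEq]
    constructor <;> (push_cast; ring)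

theorem pv_two_tri (n : ℕ) : (2 * pvTri n : Int) = (n : Int) * ((n : Int) - 1) := by
  induction n with
  | zero => simp [pvTri]
  | succ m ih =>
    simp only [pvTri]
    push_cast at ih ⊢
    linarith

theorem pv_floordiv_tri (n : ℕ) :
    PySem.Int.floordiv ((n : Int) * ((n : Int) - 1)) 2 = (pvTri n : Int) := by
  rw [PySem.Int.floordiv_eq_ediv_of_pos (by norm_num), ← pv_two_tri]
  exact Int.mul_ediv_cancel_left _ (by norm_num)

theorem pv_floordiv_tri' (n : ℕ) :
    PySem.Int.floordiv ((n : Int) * ((n : Int) + 1)) 2 = (pvTri (n + 1) : Int) := by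
  have h : (n : Int) * ((n : Int) + 1) = ((n + 1 : ℕ) : Int) * (((n + 1 : ℕ) : Int) - 1) := by
    push_cast; ring
  rw [h, pv_floordiv_tri]

-- ===== VERDICT (by name: the statement is the Claim_ definition above) =====
theorem get_linear_index_spec : Claim_equal_get_linear_index := by
  unfold Claim_equal_get_linear_index
  intro row col _
  unfold Spec_get_linear_index get_linear_index get_linear_index_alt
  simp only [pv_foldl_incr, PySem.List.length_pyRange_one]
  set n1 : ℕ := (row + 1 - 2).toNat with hn1
  set n2 : ℕ := (col + 1 - 2).toNat with hn2
  have hr : max (row - 1) 0 = (n1 : Int) := by rw [hn1]; omega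
  have hc : max (col - 1) 0 = (n2 : Int) := by rw [hn2]; omega
  rw [hr, hc, pv_floordiv_tri' n1, pv_floordiv_tri n2]
  simp only [pvTri]
  push_cast
  ring
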